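-- pv_equiv track=rewrite | github.com/tf-czu/sad_app | tree_monitor/get_dice.py | match_by_y
-- ===== SOURCE A (Python) =====
-- def match_by_y(det_ys, ann_ys):
--     # returns list of ann_index or None for each det_index
--     nd, na = len(det_ys), len(ann_ys)
--     if nd == 0:
--         return []
--     if na == 0:
--         return [None] * nd
--
--     det_idx = list(range(nd))
--     ann_idx = list(range(na))
--
--     # Typical case: 1-2 trees -> simplest: sort and pair
--     if nd == na:
--         det_sorted = sorted(det_idx, key=lambda i: det_ys[i])
--         ann_sorted = sorted(ann_idx, key=lambda j: ann_ys[j])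
--         out = [None] * nd
--         for i, j in zip(det_sorted, ann_sorted):
--             out[i] = j
--         return out
--
--     # Greedy unique matching by |y diff|
--     pairs = []
--     for i in det_idx:
--         for j in ann_idx:
--             pairs.append((abs(det_ys[i] - ann_ys[j]), i, j))
--     pairs.sort(key=lambda t: t[0])
--
--     used_det = set()
--     used_ann = set()
--     out = [None] * nd
--     for _, i, j in pairs:
--         if i in used_det or j in used_ann:
--             continue
--         out[i] = j
--         used_det.add(i)
--         used_ann.add(j)
--
--     return out
-- ===== SOURCE B (Python) =====
-- def match_by_y(det_ys, ann_ys):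
--     # returns list of ann_index or None for each det_index
--     nd, na = len(det_ys), len(ann_ys)
--     if nd == 0:
--         return []
--     if na == 0:
--         return [None] * nd
--
--     if nd == na:
--         det_sorted = sorted(range(nd), key=lambda i: det_ys[i])
--         ann_sorted = sorted(range(na), key=lambda j: ann_ys[j])
--         out = [None] * nd
--         for i, j in zip(det_sorted, ann_sorted):
--             out[i] = j
--         return out
--
--     # Greedy unique matching by |y diff|: repeatedly pick the closest
--     # still-unused (det, ann) pair, without materializing all pairs.
--     out = [None] * nd
--     used_det = set()
--     used_ann = set()
--     for _ in range(nd):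
--         best = None
--         for i in range(nd):
--             if i in used_det:
--                 continue
--             for j in range(na):
--                 if j in used_ann:
--                     continue
--                 d = abs(det_ys[i] - ann_ys[j])
--                 if best is None or d < best[0]:
--                     best = (d, i, j)
--         if best is None:
--             break
--         _, bi, bj = best
--         out[bi] = bj
--         used_det.add(bi)
--         used_ann.add(bj)
--     return out
-- ===== Notes on version B (the rewrite author's own statement) =====
-- stated objective: alternative
-- what changed: A's greedy branch materializes all nd*na (|dy|, i, j) pairs, stably sorts them by distance and sweeps; B keeps used_det/used_ann sets and repeatedly rescans for the still-unused pair with minimal distance (first hit in (i, j) scan order breaks ties), assigning one pair per pass, so no pair list and no sort are built.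
import Mathlib
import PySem

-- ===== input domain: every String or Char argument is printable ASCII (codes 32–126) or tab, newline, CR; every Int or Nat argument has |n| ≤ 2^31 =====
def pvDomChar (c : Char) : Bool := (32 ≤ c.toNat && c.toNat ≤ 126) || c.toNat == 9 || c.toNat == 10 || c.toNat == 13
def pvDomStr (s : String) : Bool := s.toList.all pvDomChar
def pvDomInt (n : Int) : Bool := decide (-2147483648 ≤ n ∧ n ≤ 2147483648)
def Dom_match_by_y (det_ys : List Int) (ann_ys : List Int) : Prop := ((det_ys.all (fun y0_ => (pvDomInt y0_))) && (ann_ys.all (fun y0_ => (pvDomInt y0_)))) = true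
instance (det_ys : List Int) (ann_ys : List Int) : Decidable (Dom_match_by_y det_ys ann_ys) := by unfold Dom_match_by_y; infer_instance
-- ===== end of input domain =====

-- B replaces A's "materialize all (det, ann) pairs, sort them, sweep" greedy branch by
-- "repeatedly scan for the closest still-unused pair" (no pair list, no sort); objective:
-- alternative (same results, O(nd + na) extra space instead of O(nd * na)).

-- state shared by both ports: (used_det, used_ann, out)
abbrev GdSt : Type := PySem.Set Int × PySem.Set Int × List (Option Int)

-- ===== PORT A =====
def match_by_y (det_ys : List Int) (ann_ys : List Int) : List (Option Int) :=
  if (det_ys.length : Int) = 0 then []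
  else if (ann_ys.length : Int) = 0 then List.replicate det_ys.length none
  else if (det_ys.length : Int) = (ann_ys.length : Int) then
    -- det_sorted = sorted(det_idx, key=...); ann_sorted = sorted(ann_idx, key=...); zip loop
    ((PySem.List.sorted (PySem.List.pyRange 0 (det_ys.length : Int) 1)
        (fun i => PySem.List.pyGetD det_ys i 0) false).zip
     (PySem.List.sorted (PySem.List.pyRange 0 (ann_ys.length : Int) 1)
        (fun j => PySem.List.pyGetD ann_ys j 0) false)).foldl
      (fun out ij => PySem.List.pySetD out ij.1 (some ij.2))
      (List.replicate det_ys.length none)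
  else
    -- pairs = [(abs(det_ys[i]-ann_ys[j]), i, j) for i ... for j ...]; pairs.sort(key=t[0]); sweep
    ((PySem.List.sorted
        ((PySem.List.pyRange 0 (det_ys.length : Int) 1).foldl
          (fun acc i =>
            (PySem.List.pyRange 0 (ann_ys.length : Int) 1).foldl
              (fun acc j =>
                acc ++ [((|PySem.List.pyGetD det_ys i 0 - PySem.List.pyGetD ann_ys j 0|, i, j) : Int × Int × Int)])
              acc)
          [])
        (fun t => t.1) false).foldl
      (fun (st : GdSt) t =>
        if PySem.Set.contains st.1 t.2.1 || PySem.Set.contains st.2.1 t.2.2 then st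
        else (PySem.Set.add st.1 t.2.1, PySem.Set.add st.2.1 t.2.2,
              PySem.List.pySetD st.2.2 t.2.1 (some t.2.2)))
      (((PySem.Set.empty : PySem.Set Int), (PySem.Set.empty : PySem.Set Int),
        List.replicate det_ys.length none) : GdSt)).2.2

-- ===== PORT B =====
-- inner double scan of Source B: best (d, i, j) over unused i, unused j ('best is None or d < best[0]')
def altScan (det_ys : List Int) (ann_ys : List Int) (used_det used_ann : PySem.Set Int) :
    Option (Int × Int × Int) :=
  (PySem.List.pyRange 0 (det_ys.length : Int) 1).foldl
    (fun best i =>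
      if PySem.Set.contains used_det i then best
      else
        (PySem.List.pyRange 0 (ann_ys.length : Int) 1).foldl
          (fun best j =>
            if PySem.Set.contains used_ann j then best
            else
              match best with
              | none => some (|PySem.List.pyGetD det_ys i 0 - PySem.List.pyGetD ann_ys j 0|, i, j)
              | some b =>
                if |PySem.List.pyGetD det_ys i 0 - PySem.List.pyGetD ann_ys j 0| < b.1 then
                  some (|PySem.List.pyGetD det_ys i 0 - PySem.List.pyGetD ann_ys j 0|, i, j)
                else best)
          best)
    none

-- outer 'for _ in range(nd): ... if best is None: break ... assign' of Source B (fuel = nd)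
def altLoop (det_ys : List Int) (ann_ys : List Int) : Nat → GdSt → GdSt
  | 0, st => st
  | f + 1, st =>
    match altScan det_ys ann_ys st.1 st.2.1 with
    | none => st
    | some b =>
      altLoop det_ys ann_ys f
        (PySem.Set.add st.1 b.2.1, PySem.Set.add st.2.1 b.2.2,
         PySem.List.pySetD st.2.2 b.2.1 (some b.2.2))

def match_by_y_alt (det_ys : List Int) (ann_ys : List Int) : List (Option Int) :=
  if (det_ys.length : Int) = 0 then []
  else if (ann_ys.length : Int) = 0 then List.replicate det_ys.length none
  else if (det_ys.length : Int) = (ann_ys.length : Int) then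
    ((PySem.List.sorted (PySem.List.pyRange 0 (det_ys.length : Int) 1)
        (fun i => PySem.List.pyGetD det_ys i 0) false).zip
     (PySem.List.sorted (PySem.List.pyRange 0 (ann_ys.length : Int) 1)
        (fun j => PySem.List.pyGetD ann_ys j 0) false)).foldl
      (fun out ij => PySem.List.pySetD out ij.1 (some ij.2))
      (List.replicate det_ys.length none)
  else
    (altLoop det_ys ann_ys det_ys.length
      (((PySem.Set.empty : PySem.Set Int), (PySem.Set.empty : PySem.Set Int),
        List.replicate det_ys.length none) : GdSt)).2.2

-- ===== PRECONDITION & SPEC =====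
def Spec_match_by_y (det_ys : List Int) (ann_ys : List Int) (out : List (Option Int)) : Prop := out = match_by_y_alt det_ys ann_ys
instance (det_ys : List Int) (ann_ys : List Int) (out : List (Option Int)) : Decidable (Spec_match_by_y det_ys ann_ys out) := by unfold Spec_match_by_y; infer_instance

-- ===== CLAIM (what is proved, stated in full; the proofs are below) =====
def Claim_equal_match_by_y : Prop := ∀ (det_ys : List Int) (ann_ys : List Int), Dom_match_by_y det_ys ann_ys → Spec_match_by_y det_ys ann_ys (match_by_y det_ys ann_ys)

-- ===== LEMMAS AND PROOFS =====

-- proof-side vocabulary for the greedy branch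
def gdPair (det_ys : List Int) (ann_ys : List Int) (i j : Int) : Int × Int × Int :=
  (|PySem.List.pyGetD det_ys i 0 - PySem.List.pyGetD ann_ys j 0|, i, j)

def gdPairs (det_ys : List Int) (ann_ys : List Int) : List (Int × Int × Int) :=
  (PySem.List.pyRange 0 (det_ys.length : Int) 1).flatMap
    (fun i => (PySem.List.pyRange 0 (ann_ys.length : Int) 1).map (gdPair det_ys ann_ys i))

-- the refined key: lexicographic (d, i, j) encoded as one integer
def gdK (nd na : Int) (p : Int × Int × Int) : Int := (p.1 * nd + p.2.1) * na + p.2.2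

def gdInR (nd na : Int) (p : Int × Int × Int) : Prop :=
  0 ≤ p.1 ∧ 0 ≤ p.2.1 ∧ p.2.1 < nd ∧ 0 ≤ p.2.2 ∧ p.2.2 < na

def gdValid (st : GdSt) (p : Int × Int × Int) : Bool :=
  !(PySem.Set.contains st.1 p.2.1) && !(PySem.Set.contains st.2.1 p.2.2)

def gdAssign (st : GdSt) (p : Int × Int × Int) : GdSt :=
  (PySem.Set.add st.1 p.2.1, PySem.Set.add st.2.1 p.2.2,
   PySem.List.pySetD st.2.2 p.2.1 (some p.2.2))

def gdStep (st : GdSt) (t : Int × Int × Int) : GdSt :=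
  if PySem.Set.contains st.1 t.2.1 || PySem.Set.contains st.2.1 t.2.2 then st else gdAssign st t

def gdAssigns : List (Int × Int × Int) → GdSt → Nat
  | [], _ => 0
  | p :: T, st => if gdValid st p then gdAssigns T (gdAssign st p) + 1 else gdAssigns T st

def gdGoS (S : List (Int × Int × Int)) : Nat → GdSt → GdSt
  | 0, st => st
  | f + 1, st =>
    match S.find? (gdValid st) with
    | none => st
    | some m => gdGoS S f (gdAssign st m)

def gdVstep (st : GdSt) (best : Option (Int × Int × Int)) (p : Int × Int × Int) :
    Option (Int × Int × Int) :=
  if gdValid st p then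
    match best with
    | none => some p
    | some b => if p.1 < b.1 then some p else best
  else best

lemma gdPairs_eq (det_ys ann_ys : List Int) :
    (PySem.List.pyRange 0 (det_ys.length : Int) 1).foldl
      (fun acc i =>
        (PySem.List.pyRange 0 (ann_ys.length : Int) 1).foldl
          (fun acc j =>
            acc ++ [((|PySem.List.pyGetD det_ys i 0 - PySem.List.pyGetD ann_ys j 0|, i, j) : Int × Int × Int)])
          acc)
      [] = gdPairs det_ys ann_ys := by
  refine Eq.trans (PySem.List.foldl_congr_mem _ _
    (fun acc i => acc ++ (PySem.List.pyRange 0 (ann_ys.length : Int) 1).map (gdPair det_ys ann_ys i))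
    [] (fun acc i _ => PySem.List.foldl_append_singleton_eq_map _ _ _)) ?_
  rw [PySem.List.foldl_append_eq_flatMap]
  rfl

lemma mem_gdPairs (det_ys ann_ys : List Int) (p : Int × Int × Int) :
    p ∈ gdPairs det_ys ann_ys ↔
      ∃ i j, 0 ≤ i ∧ i < (det_ys.length : Int) ∧ 0 ≤ j ∧ j < (ann_ys.length : Int) ∧
        p = gdPair det_ys ann_ys i j := by
  simp only [gdPairs, List.mem_flatMap, List.mem_map, PySem.List.mem_pyRange_one]
  constructor
  · rintro ⟨i, ⟨hi0, hi1⟩, j, ⟨hj0, hj1⟩, rfl⟩; exact ⟨i, j, hi0, hi1, hj0, hj1, rfl⟩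
  · rintro ⟨i, j, hi0, hi1, hj0, hj1, rfl⟩; exact ⟨i, ⟨hi0, hi1⟩, j, ⟨hj0, hj1⟩, rfl⟩

lemma gdInR_of_mem (det_ys ann_ys : List Int) (p : Int × Int × Int)
    (h : p ∈ gdPairs det_ys ann_ys) : gdInR (det_ys.length : Int) (ann_ys.length : Int) p := by
  rw [mem_gdPairs] at h
  obtain ⟨i, j, hi0, hi1, hj0, hj1, rfl⟩ := h
  exact ⟨abs_nonneg _, hi0, hi1, hj0, hj1⟩

lemma gdPairs_snd_inj (det_ys ann_ys : List Int) (p q : Int × Int × Int)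
    (hp : p ∈ gdPairs det_ys ann_ys) (hq : q ∈ gdPairs det_ys ann_ys) (h : p.2 = q.2) : p = q := by
  rw [mem_gdPairs] at hp hq
  obtain ⟨i, j, _, _, _, _, rfl⟩ := hp
  obtain ⟨i', j', _, _, _, _, rfl⟩ := hq
  simp only [gdPair, Prod.mk.injEq] at h ⊢
  obtain ⟨rfl, rfl⟩ := h
  exact ⟨rfl, rfl, rfl⟩

lemma gdK_lt_of_fst_lt (nd na : Int) (a b : Int × Int × Int)
    (ha : gdInR nd na a) (hb : gdInR nd na b) (h : a.1 < b.1) : gdK nd na a < gdK nd na b := by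
  obtain ⟨ha1, ha2, ha3, ha4, ha5⟩ := ha
  obtain ⟨hb1, hb2, hb3, hb4, hb5⟩ := hb
  unfold gdK
  have hnd : 0 ≤ nd := le_trans ha2 (le_of_lt ha3)
  have hna : 0 ≤ na := le_trans ha4 (le_of_lt ha5)
  have h1 : (a.1 + 1) * nd ≤ b.1 * nd := mul_le_mul_of_nonneg_right (by linarith) hnd
  have e1 : (a.1 + 1) * nd = a.1 * nd + nd := by ring
  have h2 : (a.1 * nd + a.2.1 + 1) * na ≤ (b.1 * nd + b.2.1) * na :=
    mul_le_mul_of_nonneg_right (by linarith) hna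
  have e2 : (a.1 * nd + a.2.1 + 1) * na = (a.1 * nd + a.2.1) * na + na := by ring
  linarith

lemma gdK_lt_of_tie (nd na : Int) (a b : Int × Int × Int)
    (ha : gdInR nd na a) (hb : gdInR nd na b) (h : a.1 = b.1)
    (hlex : a.2.1 < b.2.1 ∨ (a.2.1 = b.2.1 ∧ a.2.2 < b.2.2)) : gdK nd na a < gdK nd na b := by
  obtain ⟨ha1, ha2, ha3, ha4, ha5⟩ := ha
  obtain ⟨hb1, hb2, hb3, hb4, hb5⟩ := hb
  unfold gdK
  rw [h]
  rcases hlex with hl | ⟨he, hl⟩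
  · have hna : 0 ≤ na := le_trans ha4 (le_of_lt ha5)
    have h2 : (b.1 * nd + a.2.1 + 1) * na ≤ (b.1 * nd + b.2.1) * na :=
      mul_le_mul_of_nonneg_right (by linarith) hna
    have e2 : (b.1 * nd + a.2.1 + 1) * na = (b.1 * nd + a.2.1) * na + na := by ring
    linarith
  · rw [he]; linarith

lemma gdK_inj (det_ys ann_ys : List Int) (a b : Int × Int × Int)
    (ha : a ∈ gdPairs det_ys ann_ys) (hb : b ∈ gdPairs det_ys ann_ys)
    (h : gdK (det_ys.length : Int) (ann_ys.length : Int) a = gdK (det_ys.length : Int) (ann_ys.length : Int) b) :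
    a = b := by
  have hra := gdInR_of_mem det_ys ann_ys a ha
  have hrb := gdInR_of_mem det_ys ann_ys b hb
  rcases lt_trichotomy a.1 b.1 with h1 | h1 | h1
  · exact absurd h (ne_of_lt (gdK_lt_of_fst_lt _ _ _ _ hra hrb h1))
  · rcases lt_trichotomy a.2.1 b.2.1 with h2 | h2 | h2
    · exact absurd h (ne_of_lt (gdK_lt_of_tie _ _ _ _ hra hrb h1 (Or.inl h2)))
    · rcases lt_trichotomy a.2.2 b.2.2 with h3 | h3 | h3
      · exact absurd h (ne_of_lt (gdK_lt_of_tie _ _ _ _ hra hrb h1 (Or.inr ⟨h2, h3⟩)))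
      · exact gdPairs_snd_inj det_ys ann_ys a b ha hb (Prod.ext h2 h3)
      · exact absurd h (ne_of_gt (gdK_lt_of_tie _ _ _ _ hrb hra h1.symm (Or.inr ⟨h2.symm, h3⟩)))
    · exact absurd h (ne_of_gt (gdK_lt_of_tie _ _ _ _ hrb hra h1.symm (Or.inl h2)))
  · exact absurd h (ne_of_gt (gdK_lt_of_fst_lt _ _ _ _ hrb hra h1))

lemma gdPairs_pairwise_lex (det_ys ann_ys : List Int) :
    (gdPairs det_ys ann_ys).Pairwise
      (fun a b => a.2.1 < b.2.1 ∨ (a.2.1 = b.2.1 ∧ a.2.2 < b.2.2)) := by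
  unfold gdPairs
  rw [List.flatMap_def, List.pairwise_flatten]
  refine ⟨?_, ?_⟩
  · intro l hl
    simp only [List.mem_map] at hl
    obtain ⟨i, _, rfl⟩ := hl
    rw [List.pairwise_map]
    exact (PySem.List.pairwise_lt_pyRange_one 0 (ann_ys.length : Int)).imp
      (fun h => Or.inr ⟨rfl, h⟩)
  · rw [List.pairwise_map]
    refine (PySem.List.pairwise_lt_pyRange_one 0 (det_ys.length : Int)).imp ?_
    intro i i' hii x hx y hy
    simp only [List.mem_map] at hx hy
    obtain ⟨j, _, rfl⟩ := hx
    obtain ⟨j', _, rfl⟩ := hy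
    exact Or.inl hii

-- stability of A's sort: insertion by d alone keeps the refined key strictly increasing
lemma gdInsertBy_pairwise (nd na : Int) (x : Int × Int × Int) (acc : List (Int × Int × Int))
    (hacc : acc.Pairwise (fun a b => a.1 ≤ b.1 ∧ gdK nd na a < gdK nd na b))
    (hx : ∀ y ∈ acc, (¬ x.1 < y.1 → gdK nd na y < gdK nd na x) ∧ (x.1 < y.1 → gdK nd na x < gdK nd na y)) :
    (PySem.List.insertBy (fun a b => decide (a.1 < b.1)) x acc).Pairwise
      (fun a b => a.1 ≤ b.1 ∧ gdK nd na a < gdK nd na b) := by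
  induction acc with
  | nil => simp [PySem.List.insertBy]
  | cons y t ih =>
    rw [List.pairwise_cons] at hacc
    obtain ⟨hyt, ht⟩ := hacc
    by_cases hlt : x.1 < y.1
    · simp only [PySem.List.insertBy, decide_eq_true hlt, if_pos]
      rw [List.pairwise_cons]
      refine ⟨?_, by rw [List.pairwise_cons]; exact ⟨hyt, ht⟩⟩
      intro z hz
      rcases List.mem_cons.1 hz with rfl | hz'
      · exact ⟨le_of_lt hlt, (hx z (List.mem_cons_self)).2 hlt⟩
      · have h1 := (hyt z hz').1
        exact ⟨le_trans (le_of_lt hlt) h1,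
          (hx z (List.mem_cons_of_mem _ hz')).2 (lt_of_lt_of_le hlt h1)⟩
    · have hdec : decide (x.1 < y.1) = false := decide_eq_false hlt
      simp only [PySem.List.insertBy, hdec, Bool.false_eq_true, if_false]
      rw [List.pairwise_cons]
      constructor
      · intro z hz
        rcases (PySem.List.mem_insertBy _ _ _ _).1 hz with rfl | hz'
        · exact ⟨le_of_not_gt hlt, (hx y (List.mem_cons_self)).1 hlt⟩
        · exact hyt z hz'
      · exact ih ht (fun y' hy' => hx y' (List.mem_cons_of_mem _ hy'))

lemma gdFoldlInsert_pairwise (nd na : Int) :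
    ∀ (l acc : List (Int × Int × Int)),
      acc.Pairwise (fun a b => a.1 ≤ b.1 ∧ gdK nd na a < gdK nd na b) →
      (∀ x ∈ l, ∀ y ∈ acc,
        (¬ x.1 < y.1 → gdK nd na y < gdK nd na x) ∧ (x.1 < y.1 → gdK nd na x < gdK nd na y)) →
      l.Pairwise (fun y x =>
        (¬ x.1 < y.1 → gdK nd na y < gdK nd na x) ∧ (x.1 < y.1 → gdK nd na x < gdK nd na y)) →
      (l.foldl (fun acc x => PySem.List.insertBy (fun a b => decide (a.1 < b.1)) x acc) acc).Pairwise
        (fun a b => a.1 ≤ b.1 ∧ gdK nd na a < gdK nd na b) := by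
  intro l
  induction l with
  | nil => intro acc hacc _ _; simpa using hacc
  | cons x l' ih =>
    intro acc hacc hcross hpl
    rw [List.pairwise_cons] at hpl
    obtain ⟨hxl, hpl'⟩ := hpl
    simp only [List.foldl_cons]
    apply ih
    · exact gdInsertBy_pairwise nd na x acc hacc
        (fun y hy => hcross x (List.mem_cons_self) y hy)
    · intro z hz y hy
      rcases (PySem.List.mem_insertBy _ _ _ _).1 hy with rfl | hy'
      · exact hxl z hz
      · exact hcross z (List.mem_cons_of_mem _ hz) y hy'
    · exact hpl'

lemma gdSorted_pairwise (det_ys ann_ys : List Int) :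
    (PySem.List.sorted (gdPairs det_ys ann_ys) (fun t => t.1) false).Pairwise
      (fun a b => a.1 ≤ b.1 ∧
        gdK (det_ys.length : Int) (ann_ys.length : Int) a <
        gdK (det_ys.length : Int) (ann_ys.length : Int) b) := by
  rw [PySem.List.sorted_eq_foldl_insertBy]
  apply gdFoldlInsert_pairwise
  · exact List.Pairwise.nil
  · intro x _ y hy; exact absurd hy (List.not_mem_nil)
  · refine (gdPairs_pairwise_lex det_ys ann_ys).imp_of_mem ?_
    intro a b ha hb hlex
    have hra := gdInR_of_mem det_ys ann_ys a ha
    have hrb := gdInR_of_mem det_ys ann_ys b hb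
    constructor
    · intro hnlt
      rcases lt_or_eq_of_le (le_of_not_gt hnlt) with h | h
      · exact gdK_lt_of_fst_lt _ _ _ _ hra hrb h
      · exact gdK_lt_of_tie _ _ _ _ hra hrb h hlex
    · intro hlt
      exact gdK_lt_of_fst_lt _ _ _ _ hrb hra hlt

lemma gdContains_add (s : PySem.Set Int) (x y : Int) :
    PySem.Set.contains (PySem.Set.add s x) y = (PySem.Set.contains s y || (y == x)) := by
  rw [Bool.eq_iff_iff]
  simp [PySem.Set.mem_add]

lemma gdValid_iff (st : GdSt) (p : Int × Int × Int) :
    gdValid st p = true ↔ p.2.1 ∉ st.1 ∧ p.2.2 ∉ st.2.1 := by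
  simp [gdValid]

lemma gdValid_assign_mono (st : GdSt) (p q : Int × Int × Int)
    (h : gdValid st p = false) : gdValid (gdAssign st q) p = false := by
  cases hv : gdValid (gdAssign st q) p with
  | false => rfl
  | true =>
    exfalso
    rw [gdValid_iff] at hv
    obtain ⟨h1, h2⟩ := hv
    simp only [gdAssign, PySem.Set.mem_add] at h1 h2
    have : gdValid st p = true := (gdValid_iff st p).2 ⟨fun hm => h1 (Or.inl hm), fun hm => h2 (Or.inl hm)⟩
    rw [this] at h
    simp at h

lemma gdValid_assign_self (st : GdSt) (p : Int × Int × Int) :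
    gdValid (gdAssign st p) p = false := by
  cases hv : gdValid (gdAssign st p) p with
  | false => rfl
  | true =>
    exfalso
    rw [gdValid_iff] at hv
    exact hv.1 (by simp [gdAssign, PySem.Set.mem_add])

lemma altScan_eq_foldP (det_ys ann_ys : List Int) (st : GdSt) :
    altScan det_ys ann_ys st.1 st.2.1 = (gdPairs det_ys ann_ys).foldl (gdVstep st) none := by
  unfold altScan gdPairs
  rw [List.foldl_flatMap]
  apply PySem.List.foldl_congr_mem
  intro best i _
  rw [List.foldl_map]
  by_cases hud : PySem.Set.contains st.1 i = true
  · rw [if_pos hud]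
    have hm : i ∈ st.1 := (PySem.Set.contains_iff _ _).1 hud
    rw [PySem.List.foldl_congr_mem _ _ (fun acc _ => acc) best
      (fun acc j _ => by simp [gdVstep, gdValid, gdPair, hm])]
    exact (PySem.List.foldl_ignore _ _).symm
  · rw [if_neg hud]
    apply PySem.List.foldl_congr_mem
    intro acc j _
    have hmi : i ∉ st.1 := fun hm => hud ((PySem.Set.contains_iff _ _).2 hm)
    by_cases hua : j ∈ st.2.1
    · simp [gdVstep, gdValid, gdPair, hua]
    · simp [gdVstep, gdValid, gdPair, hua, hmi]

lemma gdScan_spec (nd na : Int) :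
    ∀ (l : List (Int × Int × Int)) (best : Option (Int × Int × Int)) (st : GdSt),
      (∀ p ∈ l, gdInR nd na p) →
      (∀ b, best = some b → gdInR nd na b ∧ gdValid st b = true) →
      (∀ b, best = some b → ∀ x ∈ l, x.1 = b.1 → gdK nd na b < gdK nd na x) →
      l.Pairwise (fun a b => a.1 = b.1 → gdK nd na a < gdK nd na b) →
      ((l.foldl (gdVstep st) best = none → best = none ∧ ∀ p ∈ l, gdValid st p = false)
        ∧ ∀ m, l.foldl (gdVstep st) best = some m →
            (gdInR nd na m ∧ gdValid st m = true)
            ∧ (m ∈ l ∨ best = some m)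
            ∧ (∀ x ∈ l, gdValid st x = true → gdK nd na m ≤ gdK nd na x)
            ∧ (∀ b, best = some b → gdK nd na m ≤ gdK nd na b)) := by
  intro l
  induction l with
  | nil =>
    intro best st _ hb _ _
    constructor
    · intro h
      exact ⟨h, by simp⟩
    · intro m hm
      exact ⟨hb m hm, Or.inr hm, by simp, fun b hbeq => by rw [hbeq] at hm; injection hm with e; rw [e]⟩
  | cons x l' ih =>
    intro best st hl hb hcross hpl
    rw [List.pairwise_cons] at hpl
    obtain ⟨hxl, hpl'⟩ := hpl
    have hrx := hl x List.mem_cons_self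
    have hl' : ∀ p ∈ l', gdInR nd na p := fun p hp => hl p (List.mem_cons_of_mem _ hp)
    simp only [List.foldl_cons]
    by_cases hvx : gdValid st x = true
    · cases best with
      | none =>
        have he : gdVstep st none x = some x := by simp [gdVstep, hvx]
        rw [he]
        obtain ⟨IH1, IH2⟩ := ih (some x) st hl'
          (fun b hb0 => by injection hb0 with e; rw [← e]; exact ⟨hrx, hvx⟩)
          (fun b hb0 y hy hty => by injection hb0 with e; rw [← e] at hty ⊢; exact hxl y hy hty.symm)
          hpl'
        constructor
        · intro h
          exact absurd (IH1 h).1 (by simp)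
        · intro m hm
          obtain ⟨hmv, hmem, hmin, hminb⟩ := IH2 m hm
          refine ⟨hmv, ?_, ?_, ?_⟩
          · rcases hmem with h | h
            · exact Or.inl (List.mem_cons_of_mem _ h)
            · injection h with e; rw [e]; exact Or.inl List.mem_cons_self
          · intro y hy hvy
            rcases List.mem_cons.1 hy with rfl | hy'
            · exact hminb y rfl
            · exact hmin y hy' hvy
          · intro b hbeq; exact nomatch hbeq
      | some b0 =>
        obtain ⟨hrb0, hvb0⟩ := hb b0 rfl
        by_cases hlt : x.1 < b0.1
        · have he : gdVstep st (some b0) x = some x := by simp [gdVstep, hvx, hlt]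
          rw [he]
          obtain ⟨IH1, IH2⟩ := ih (some x) st hl'
            (fun b hb0 => by injection hb0 with e; rw [← e]; exact ⟨hrx, hvx⟩)
            (fun b hb0 y hy hty => by injection hb0 with e; rw [← e] at hty ⊢; exact hxl y hy hty.symm)
            hpl'
          constructor
          · intro h
            exact absurd (IH1 h).1 (by simp)
          · intro m hm
            obtain ⟨hmv, hmem, hmin, hminb⟩ := IH2 m hm
            have hmx : gdK nd na m ≤ gdK nd na x := hminb x rfl
            refine ⟨hmv, ?_, ?_, ?_⟩
            · rcases hmem with h | h
              · exact Or.inl (List.mem_cons_of_mem _ h)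
              · injection h with e; rw [e]; exact Or.inl List.mem_cons_self
            · intro y hy hvy
              rcases List.mem_cons.1 hy with rfl | hy'
              · exact hmx
              · exact hmin y hy' hvy
            · intro b hbeq
              injection hbeq with e
              rw [← e]
              exact le_trans hmx (le_of_lt (gdK_lt_of_fst_lt nd na x b0 hrx hrb0 hlt))
        · have he : gdVstep st (some b0) x = some b0 := by simp [gdVstep, hvx, hlt]
          rw [he]
          obtain ⟨IH1, IH2⟩ := ih (some b0) st hl' hb
            (fun b hb0 y hy hty => hcross b hb0 y (List.mem_cons_of_mem _ hy) hty)
            hpl'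
          constructor
          · intro h
            exact absurd (IH1 h).1 (by simp)
          · intro m hm
            obtain ⟨hmv, hmem, hmin, hminb⟩ := IH2 m hm
            have hmb0 : gdK nd na m ≤ gdK nd na b0 := hminb b0 rfl
            have hb0x : gdK nd na b0 < gdK nd na x := by
              rcases lt_or_eq_of_le (le_of_not_gt hlt) with h | h
              · exact gdK_lt_of_fst_lt nd na b0 x hrb0 hrx h
              · exact hcross b0 rfl x List.mem_cons_self h.symm
            refine ⟨hmv, ?_, ?_, ?_⟩
            · rcases hmem with h | h
              · exact Or.inl (List.mem_cons_of_mem _ h)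
              · exact Or.inr h
            · intro y hy hvy
              rcases List.mem_cons.1 hy with rfl | hy'
              · exact le_trans hmb0 (le_of_lt hb0x)
              · exact hmin y hy' hvy
            · exact hminb
    · have hvxf : gdValid st x = false := by
        cases h : gdValid st x
        · rfl
        · exact absurd h hvx
      have he : gdVstep st best x = best := by simp [gdVstep, hvxf]
      rw [he]
      obtain ⟨IH1, IH2⟩ := ih best st hl' hb
        (fun b hb0 y hy hty => hcross b hb0 y (List.mem_cons_of_mem _ hy) hty)
        hpl'
      constructor
      · intro h
        obtain ⟨h1, h2⟩ := IH1 h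
        refine ⟨h1, fun p hp => ?_⟩
        rcases List.mem_cons.1 hp with rfl | hp'
        · exact hvxf
        · exact h2 p hp'
      · intro m hm
        obtain ⟨hmv, hmem, hmin, hminb⟩ := IH2 m hm
        refine ⟨hmv, hmem.imp (List.mem_cons_of_mem _) id, ?_, hminb⟩
        intro y hy hvy
        rcases List.mem_cons.1 hy with rfl | hy'
        · rw [hvy] at hvxf; simp at hvxf
        · exact hmin y hy' hvy

lemma gdScan_eq_find (det_ys ann_ys : List Int) (st : GdSt) :
    (gdPairs det_ys ann_ys).foldl (gdVstep st) none =
      (PySem.List.sorted (gdPairs det_ys ann_ys) (fun t => t.1) false).find? (gdValid st) := by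
  have hplP : (gdPairs det_ys ann_ys).Pairwise
      (fun a b => a.1 = b.1 →
        gdK (det_ys.length : Int) (ann_ys.length : Int) a <
        gdK (det_ys.length : Int) (ann_ys.length : Int) b) := by
    refine (gdPairs_pairwise_lex det_ys ann_ys).imp_of_mem ?_
    intro a b ha hb hlex hte
    exact gdK_lt_of_tie _ _ _ _ (gdInR_of_mem _ _ _ ha) (gdInR_of_mem _ _ _ hb) hte hlex
  obtain ⟨H1, H2⟩ := gdScan_spec (det_ys.length : Int) (ann_ys.length : Int)
    (gdPairs det_ys ann_ys) none st
    (fun p hp => gdInR_of_mem _ _ p hp)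
    (fun b hb0 => nomatch hb0)
    (fun b hb0 => nomatch hb0)
    hplP
  cases hr : (gdPairs det_ys ann_ys).foldl (gdVstep st) none with
  | none =>
    obtain ⟨_, hnov⟩ := H1 hr
    symm
    rw [List.find?_eq_none]
    intro x hx hvx
    rw [hnov x ((PySem.List.mem_sorted _ _ _ _).1 hx)] at hvx
    simp at hvx
  | some m =>
    obtain ⟨⟨hmr, hmv⟩, hmem, hmin, _⟩ := H2 m hr
    rcases hmem with hmem | h
    swap
    · exact nomatch h
    cases hf : (PySem.List.sorted (gdPairs det_ys ann_ys) (fun t => t.1) false).find? (gdValid st) with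
    | none =>
      exfalso
      rw [List.find?_eq_none] at hf
      exact hf m ((PySem.List.mem_sorted _ _ _ _).2 hmem) hmv
    | some m' =>
      have hm'P : m' ∈ gdPairs det_ys ann_ys :=
        (PySem.List.mem_sorted _ _ _ _).1 (List.mem_of_find?_eq_some hf)
      have hv' : gdValid st m' = true := List.find?_some hf
      have h1 : gdK (det_ys.length : Int) (ann_ys.length : Int) m ≤
          gdK (det_ys.length : Int) (ann_ys.length : Int) m' := hmin m' hm'P hv'
      obtain ⟨hpm', as, bs, hSdec, hfail⟩ := List.find?_eq_some_iff_append.1 hf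
      have hSpair := gdSorted_pairwise det_ys ann_ys
      have hmS : m ∈ PySem.List.sorted (gdPairs det_ys ann_ys) (fun t => t.1) false :=
        (PySem.List.mem_sorted _ _ _ _).2 hmem
      rw [hSdec] at hmS hSpair
      have h2 : gdK (det_ys.length : Int) (ann_ys.length : Int) m' ≤
          gdK (det_ys.length : Int) (ann_ys.length : Int) m := by
        rcases List.mem_append.1 hmS with hin | hin
        · exfalso
          have := hfail m hin
          rw [hmv] at this
          simp at this
        · rcases List.mem_cons.1 hin with rfl | hin'
          · exact le_refl _
          · have hq := (List.pairwise_append.1 hSpair).2.1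
            rw [List.pairwise_cons] at hq
            exact le_of_lt (hq.1 m hin').2
      rw [gdK_inj det_ys ann_ys m m' hmem hm'P (le_antisymm h1 h2)]

lemma altLoop_eq_gdGoS (det_ys ann_ys : List Int) :
    ∀ (f : Nat) (st : GdSt),
      altLoop det_ys ann_ys f st =
        gdGoS (PySem.List.sorted (gdPairs det_ys ann_ys) (fun t => t.1) false) f st := by
  intro f
  induction f with
  | zero => intro st; rfl
  | succ f ih =>
    intro st
    simp only [altLoop, gdGoS, altScan_eq_foldP det_ys ann_ys st, gdScan_eq_find det_ys ann_ys st]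
    cases hf : List.find? (gdValid st)
        (PySem.List.sorted (gdPairs det_ys ann_ys) (fun t => t.1) false) with
    | none => rfl
    | some m => exact ih _

lemma gdGoS_drop (p : Int × Int × Int) (T : List (Int × Int × Int)) :
    ∀ (f : Nat) (st : GdSt), gdValid st p = false → gdGoS (p :: T) f st = gdGoS T f st := by
  intro f
  induction f with
  | zero => intro st _; rfl
  | succ f ih =>
    intro st h
    have hnp : ¬ gdValid st p = true := by rw [h]; simp
    simp only [gdGoS, List.find?_cons_of_neg hnp]
    cases hf : List.find? (gdValid st) T with
    | none => rfl
    | some m => exact ih _ (gdValid_assign_mono st p m h)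

lemma gdFoldl_eq_gdGoS :
    ∀ (S : List (Int × Int × Int)) (st : GdSt) (f : Nat),
      gdAssigns S st ≤ f → S.foldl gdStep st = gdGoS S f st := by
  intro S
  induction S with
  | nil =>
    intro st f _
    cases f <;> rfl
  | cons p T ih =>
    intro st f hle
    by_cases hv : gdValid st p = true
    · have hcnt : gdAssigns (p :: T) st = gdAssigns T (gdAssign st p) + 1 := by
        simp [gdAssigns, hv]
      rw [hcnt] at hle
      obtain ⟨f', rfl⟩ : ∃ f', f = f' + 1 := ⟨f - 1, by omega⟩
      have hstep : gdStep st p = gdAssign st p := by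
        rw [gdValid_iff] at hv
        simp [gdStep, hv.1, hv.2]
      rw [List.foldl_cons, hstep]
      simp only [gdGoS, List.find?_cons_of_pos hv]
      rw [gdGoS_drop p T f' (gdAssign st p) (gdValid_assign_self st p)]
      exact ih (gdAssign st p) f' (by omega)
    · have hvf : gdValid st p = false := by
        cases h : gdValid st p
        · rfl
        · exact absurd h hv
      have hstep : gdStep st p = st := by
        have hmem : p.2.1 ∈ st.1 ∨ p.2.2 ∈ st.2.1 := by
          by_contra hc
          push Not at hc
          exact hv ((gdValid_iff st p).2 hc)
        rcases hmem with hm | hm <;> simp [gdStep, hm]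
      have hcnt : gdAssigns (p :: T) st = gdAssigns T st := by simp [gdAssigns, hvf]
      rw [hcnt] at hle
      rw [List.foldl_cons, hstep, gdGoS_drop p T f st hvf]
      exact ih st f hle

lemma gdAssigns_le (nd : Int) :
    ∀ (S : List (Int × Int × Int)) (st : GdSt),
      (∀ p ∈ S, 0 ≤ p.2.1 ∧ p.2.1 < nd) →
      gdAssigns S st ≤ ((PySem.List.pyRange 0 nd 1).filter (fun i => !(PySem.Set.contains st.1 i))).length := by
  intro S
  induction S with
  | nil => intro st _; simp [gdAssigns]
  | cons p T ih =>
    intro st hb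
    by_cases hv : gdValid st p = true
    · simp only [gdAssigns, hv, if_pos]
      have hsub := ih (gdAssign st p) (fun q hq => hb q (List.mem_cons_of_mem _ hq))
      have hfe : ((PySem.List.pyRange 0 nd 1).filter
            (fun i => !(PySem.Set.contains (gdAssign st p).1 i))) =
          ((PySem.List.pyRange 0 nd 1).filter (fun i => !(PySem.Set.contains st.1 i))).filter
            (fun i => !(i == p.2.1)) := by
        rw [List.filter_filter]
        apply List.filter_congr
        intro i _
        show (!(PySem.Set.contains (PySem.Set.add st.1 p.2.1) i)) = _
        rw [gdContains_add]
        cases h1 : PySem.Set.contains st.1 i <;> cases h2 : (i == p.2.1) <;> rfl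
      have hmem : p.2.1 ∈ (PySem.List.pyRange 0 nd 1).filter
          (fun i => !(PySem.Set.contains st.1 i)) := by
        rw [List.mem_filter]
        constructor
        · rw [PySem.List.mem_pyRange_one]
          exact hb p List.mem_cons_self
        · rw [gdValid_iff] at hv
          cases h1 : PySem.Set.contains st.1 p.2.1
          · rfl
          · exact absurd ((PySem.Set.contains_iff _ _).1 h1) hv.1
      have hlt : (((PySem.List.pyRange 0 nd 1).filter (fun i => !(PySem.Set.contains st.1 i))).filter
            (fun i => !(i == p.2.1))).length <
          ((PySem.List.pyRange 0 nd 1).filter (fun i => !(PySem.Set.contains st.1 i))).length :=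
        List.length_filter_lt_length_iff_exists.2 ⟨p.2.1, hmem, by simp⟩
      rw [hfe] at hsub
      omega
    · have hvf : gdValid st p = false := by
        cases h : gdValid st p
        · rfl
        · exact absurd h hv
      simp only [gdAssigns, hvf, Bool.false_eq_true, if_false]
      exact ih st (fun q hq => hb q (List.mem_cons_of_mem _ hq))

-- ===== VERDICT (by name: the statement is the Claim_ definition above) =====
theorem match_by_y_spec : Claim_equal_match_by_y := by
  intro det_ys ann_ys _
  show match_by_y det_ys ann_ys = match_by_y_alt det_ys ann_ys
  unfold match_by_y match_by_y_alt
  by_cases h1 : (det_ys.length : Int) = 0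
  · simp [h1]
  by_cases h2 : (ann_ys.length : Int) = 0
  · simp [h2]
  by_cases h3 : (det_ys.length : Int) = (ann_ys.length : Int)
  · simp [h3]
  simp only [if_neg h1, if_neg h2, if_neg h3]
  rw [gdPairs_eq]
  show (List.foldl gdStep
      (((PySem.Set.empty : PySem.Set Int), (PySem.Set.empty : PySem.Set Int),
        List.replicate det_ys.length none) : GdSt)
      (PySem.List.sorted (gdPairs det_ys ann_ys) (fun t => t.1) false)).2.2 = _
  have hbounds : ∀ p ∈ PySem.List.sorted (gdPairs det_ys ann_ys) (fun t => t.1) false,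
      0 ≤ p.2.1 ∧ p.2.1 < (det_ys.length : Int) := by
    intro p hp
    have := gdInR_of_mem det_ys ann_ys p ((PySem.List.mem_sorted _ _ _ _).1 hp)
    exact ⟨this.2.1, this.2.2.1⟩
  have hfilter : ((PySem.List.pyRange 0 (det_ys.length : Int) 1).filter
      (fun i => !(PySem.Set.contains (PySem.Set.empty : PySem.Set Int) i))).length =
      det_ys.length := by
    simp [PySem.Set.contains, PySem.Set.empty, PySem.List.length_pyRange_one]
  have hfuel : gdAssigns (PySem.List.sorted (gdPairs det_ys ann_ys) (fun t => t.1) false)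
      (((PySem.Set.empty : PySem.Set Int), (PySem.Set.empty : PySem.Set Int),
        List.replicate det_ys.length none) : GdSt) ≤ det_ys.length := by
    have := gdAssigns_le (det_ys.length : Int)
      (PySem.List.sorted (gdPairs det_ys ann_ys) (fun t => t.1) false)
      (((PySem.Set.empty : PySem.Set Int), (PySem.Set.empty : PySem.Set Int),
        List.replicate det_ys.length none) : GdSt) hbounds
    rw [hfilter] at this
    exact this
  rw [gdFoldl_eq_gdGoS _ _ det_ys.length hfuel, ← altLoop_eq_gdGoS]
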